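-- pv_equiv track=rewrite | github.com/abhi1238/biochirp | app/utils/graph.py | _build_table_columns
-- ===== SOURCE A (Python) =====
-- from typing import Any, Dict, List, Optional, Tuple
--
-- def _build_table_columns(
--     order: List[str],
--     parent: Dict[str, Optional[str]],
--     fk_lookup: Dict[Tuple[str, str], List[Tuple[str, str]]],
--     concept_to_table: Dict[str, str],
--     db_name: str,
-- ) -> Dict[str, Dict[str, List[str]]]:
--     """Build per-table concept_columns and join_columns metadata."""
--     table_columns: Dict[str, Dict[str, List[str]]] = {}
--
--     for t in order:
--         fq_t = f"{db_name}.{t}"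
--         concept_cols = sorted(c for c, mapped in concept_to_table.items() if mapped == t)
--
--         join_cols: List[str] = []
--         par = parent.get(t)
--         if par is not None:
--             # Use NetworkX-selected tree edge direction + FK lookup.
--             child_side_cols = [child_col for _, child_col in sorted(fk_lookup.get((par, t), []))]
--             # Stable dedup
--             join_cols = list(dict.fromkeys(child_side_cols))
--
--         table_columns[fq_t] = {
--             "concept_columns": concept_cols,
--             "join_columns": join_cols,
--         }
--
--     return table_columns
-- ===== SOURCE B (Python) =====
-- from typing import Any, Dict, List, Optional, Tuple
--
-- def _concept_groups(concept_to_table: "Dict[str, str]") -> "Dict[str, List[str]]":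
--     """One pass: bucket concept names by their mapped table."""
--     groups: Dict[str, List[str]] = {}
--     for c, t in concept_to_table.items():
--         groups.setdefault(t, []).append(c)
--     return groups
--
-- def _join_columns(par: "Optional[str]", t: str, fk_lookup) -> "List[str]":
--     if par is None:
--         return []
--     cols: List[str] = []
--     for _, child in sorted(fk_lookup.get((par, t), [])):
--         if child not in cols:
--             cols.append(child)
--     return cols
--
-- def _build_table_columns(
--     order: "List[str]",
--     parent: "Dict[str, Optional[str]]",
--     fk_lookup: "Dict[Tuple[str, str], List[Tuple[str, str]]]",
--     concept_to_table: "Dict[str, str]",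
--     db_name: str,
-- ) -> "Dict[str, Dict[str, List[str]]]":
--     """Build per-table concept_columns and join_columns metadata.
--
--     Concepts are grouped by table in ONE pass (instead of a scan of
--     concept_to_table per table); the result is a dict comprehension."""
--     groups = _concept_groups(concept_to_table)
--     return {
--         db_name + "." + t: {
--             "concept_columns": sorted(groups.get(t, [])),
--             "join_columns": _join_columns(parent.get(t), t, fk_lookup),
--         }
--         for t in order
--     }
-- ===== Notes on version B (the rewrite author's own statement) =====
-- stated objective: faster
-- what changed: B groups concepts by mapped table in one pass over concept_to_table and builds the result as a dict comprehension over order with helper functions, instead of A's full scan of concept_to_table for every table; join-column dedup is a membership-list loop instead of dict.fromkeys.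
import Mathlib
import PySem

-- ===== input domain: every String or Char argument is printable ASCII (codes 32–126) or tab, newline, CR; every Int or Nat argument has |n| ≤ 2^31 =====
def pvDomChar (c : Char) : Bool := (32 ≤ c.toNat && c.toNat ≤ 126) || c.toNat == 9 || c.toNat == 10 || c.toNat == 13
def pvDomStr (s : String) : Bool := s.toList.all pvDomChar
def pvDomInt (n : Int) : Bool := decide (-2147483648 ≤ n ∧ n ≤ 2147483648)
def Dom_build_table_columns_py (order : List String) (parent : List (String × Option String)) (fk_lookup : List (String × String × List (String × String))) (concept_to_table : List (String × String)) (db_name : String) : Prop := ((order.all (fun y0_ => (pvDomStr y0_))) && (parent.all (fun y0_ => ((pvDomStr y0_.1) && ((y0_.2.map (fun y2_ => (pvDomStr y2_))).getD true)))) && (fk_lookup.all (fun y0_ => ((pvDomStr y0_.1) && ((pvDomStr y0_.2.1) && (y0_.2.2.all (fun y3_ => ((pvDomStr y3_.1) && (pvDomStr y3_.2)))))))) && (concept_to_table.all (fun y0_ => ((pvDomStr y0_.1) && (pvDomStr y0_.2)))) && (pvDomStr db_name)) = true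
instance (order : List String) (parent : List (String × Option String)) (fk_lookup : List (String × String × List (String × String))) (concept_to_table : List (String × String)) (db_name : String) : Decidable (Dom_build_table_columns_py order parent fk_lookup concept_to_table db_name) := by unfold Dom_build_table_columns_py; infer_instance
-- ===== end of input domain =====

-- B groups concepts by mapped table in ONE pass (A rescans concept_to_table per table),
-- dedups join columns by list membership, and builds the result as a dict comprehension
-- (objective: faster on the concept scan).

-- ===== PORT A =====
-- literal transliteration of _build_table_columns; the tuple-keyed fk_lookup dict is
-- regrouped from the curried list encoding (String × String × v ↦ (String × String) × v)
def build_table_columns_py (order : List String) (parent : List (String × Option String)) (fk_lookup : List (String × String × List (String × String))) (concept_to_table : List (String × String)) (db_name : String) : List (String × List (String × List String)) :=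
  let parentD : PySem.Dict String (Option String) := PySem.Dict.ofList parent
  let fkD : PySem.Dict (String × String) (List (String × String)) :=
    PySem.Dict.ofList (fk_lookup.map (fun e => ((e.1, e.2.1), e.2.2)))
  let cttD : PySem.Dict String String := PySem.Dict.ofList concept_to_table
  (order.foldl (fun (tc : PySem.Dict String (List (String × List String))) t =>
      let fq_t := db_name ++ "." ++ t
      let concept_cols :=
        PySem.List.sorted ((cttD.items.filter (fun p => p.2 == t)).map (fun p => p.1)) (fun c => c) false
      let join_cols : List String :=
        match parentD.getD t none with
        | none => []
        | some par =>
          let child_side_cols :=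
            (PySem.List.sorted2 (fkD.getD (par, t) []) (fun e => e.1) (fun e => e.2)).map (fun e => e.2)
          PySem.List.dedup child_side_cols
      tc.insert fq_t [("concept_columns", concept_cols), ("join_columns", join_cols)])
    PySem.Dict.empty).items

-- ===== PORT B =====
-- transliteration of Source B: helper _concept_groups — one grouping pass over the items
def pvConceptGroups (concept_to_table : List (String × String)) : PySem.Dict String (List String) :=
  (PySem.Dict.ofList concept_to_table).items.foldl
    (fun g p => g.modify p.2 [] (fun l => l ++ [p.1])) PySem.Dict.empty

-- helper _join_columns: membership-list dedup of the child-side columns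
def pvJoinColumns (par : Option String) (t : String)
    (fkD : PySem.Dict (String × String) (List (String × String))) : List String :=
  match par with
  | none => []
  | some p =>
    (PySem.List.sorted2 (fkD.getD (p, t) []) (fun e => e.1) (fun e => e.2)).foldl
      (fun (cols : List String) e => if cols.contains e.2 then cols else cols ++ [e.2]) []

-- main body of Source B: a dict comprehension over `order`
def build_table_columns_py_alt (order : List String) (parent : List (String × Option String)) (fk_lookup : List (String × String × List (String × String))) (concept_to_table : List (String × String)) (db_name : String) : List (String × List (String × List String)) :=
  let groups := pvConceptGroups concept_to_table
  (PySem.Dict.ofList (order.map (fun t =>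
      (db_name ++ "." ++ t,
       [("concept_columns", PySem.List.sorted (groups.getD t []) (fun c => c) false),
        ("join_columns",
          pvJoinColumns ((PySem.Dict.ofList parent).getD t none) t
            (PySem.Dict.ofList (fk_lookup.map (fun e => ((e.1, e.2.1), e.2.2)))))])))).items

-- ===== PRECONDITION & SPEC =====
def Spec_build_table_columns_py (order : List String) (parent : List (String × Option String)) (fk_lookup : List (String × String × List (String × String))) (concept_to_table : List (String × String)) (db_name : String) (out : List (String × List (String × List String))) : Prop := out = build_table_columns_py_alt order parent fk_lookup concept_to_table db_name
instance (order : List String) (parent : List (String × Option String)) (fk_lookup : List (String × String × List (String × String))) (concept_to_table : List (String × String)) (db_name : String) (out : List (String × List (String × List String))) : Decidable (Spec_build_table_columns_py order parent fk_lookup concept_to_table db_name out) := by unfold Spec_build_table_columns_py; infer_instance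

-- ===== CLAIM (what is proved, stated in full; the proofs are below) =====
def Claim_equal_build_table_columns_py : Prop := ∀ (order : List String) (parent : List (String × Option String)) (fk_lookup : List (String × String × List (String × String))) (concept_to_table : List (String × String)) (db_name : String), Dom_build_table_columns_py order parent fk_lookup concept_to_table db_name → Spec_build_table_columns_py order parent fk_lookup concept_to_table db_name (build_table_columns_py order parent fk_lookup concept_to_table db_name)

-- ===== LEMMAS AND PROOFS =====

-- a dict literal built from key/value functions is the corresponding insert loop
theorem pv_ofList_map {α κ ν : Type} [BEq κ] (l : List α) (k : α → κ) (v : α → ν) :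
    PySem.Dict.ofList (l.map (fun a => (k a, v a)))
      = l.foldl (fun d a => d.insert (k a) (v a)) PySem.Dict.empty := by
  rw [show PySem.Dict.ofList (l.map (fun a => (k a, v a)))
        = (l.map (fun a => (k a, v a))).foldl (fun d p => d.insert p.1 p.2) PySem.Dict.empty from rfl,
      List.foldl_map]

-- the grouping pass of _concept_groups: per-key contents = A's filter of the items, in order
theorem pv_group_getD (L : List (String × String)) (t : String) :
    (L.foldl (fun d p => d.modify p.2 [] (fun l => l ++ [p.1])) (PySem.Dict.empty : PySem.Dict String (List String))).getD t []
      = (L.filter (fun p => p.2 == t)).map (fun p => p.1) := by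
  have h := PySem.Dict.getD_foldl_modify_append (l := L.map (fun p => (p.2, p.1)))
    (d := (PySem.Dict.empty : PySem.Dict String (List String))) (c := t)
  simpa [List.foldl_map, List.filter_map, Function.comp, List.map_map, PySem.Dict.getD_empty] using h

-- the membership-list dedup loop of _join_columns = dict.fromkeys dedup of the snd components
theorem pv_join_fold (xs : List (String × String)) :
    xs.foldl (fun (cols : List String) e => if cols.contains e.2 then cols else cols ++ [e.2]) []
      = PySem.List.dedup (xs.map (fun e => e.2)) := by
  rw [show PySem.List.dedup (xs.map (fun e => e.2))
        = (xs.map (fun e => e.2)).foldl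
            (fun (cols : List String) c => if cols.contains c then cols else cols ++ [c]) [] from rfl,
      List.foldl_map]

-- ===== VERDICT (by name: the statement is the Claim_ definition above) =====
theorem build_table_columns_py_spec : Claim_equal_build_table_columns_py := by
  intro order parent fk_lookup concept_to_table db_name _hdom
  unfold Spec_build_table_columns_py build_table_columns_py build_table_columns_py_alt
  simp only []
  rw [pv_ofList_map order]
  congr 1
  apply PySem.List.foldl_congr_mem
  intro tc t _ht
  simp only [pvConceptGroups, pv_group_getD]
  cases hpar : (PySem.Dict.ofList parent).getD t none with
  | none => simp only [pvJoinColumns]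
  | some par => simp only [pvJoinColumns, pv_join_fold]
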